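-- pv_equiv track=rewrite | github.com/bernie-sg/riley-cycles-watch | cycles-detector/test_frontend_simulation.py | find_troughs
-- ===== SOURCE A (Python) =====
-- def find_troughs(signal, wavelength):
--     """Simulate frontend findTroughs"""
--     distance = wavelength // 4
--
--     # Find all local minima
--     all_troughs = []
--     for i in range(1, len(signal) - 1):
--         if signal[i] < signal[i-1] and signal[i] < signal[i+1]:
--             all_troughs.append({'idx': i, 'value': signal[i]})
--
--     # Filter by distance
--     filtered_troughs = []
--     i = 0
--     while i < len(all_troughs):
--         window_end = all_troughs[i]['idx'] + distance
--         window = [all_troughs[i]]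
--         j = i + 1
--         while j < len(all_troughs) and all_troughs[j]['idx'] < window_end:
--             window.append(all_troughs[j])
--             j += 1
--
--         best = min(window, key=lambda p: p['value'])
--         filtered_troughs.append(best['idx'])
--         i = j
--
--     return filtered_troughs
-- ===== SOURCE B (Python) =====
-- def find_troughs(sig, wavelength):
--     """Single online pass: detect strict local minima and merge them into
--     distance windows on the fly (no intermediate trough list)."""
--     distance = wavelength // 4
--     result = []
--     window_end = 0
--     best_idx = -1
--     best_val = 0
--     have = False
--     for i in range(1, len(sig) - 1):
--         v = sig[i]
--         if v < sig[i - 1] and v < sig[i + 1]: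
--             if have and i < window_end:
--                 if v < best_val:
--                     best_idx, best_val = i, v
--             else:
--                 if have:
--                     result.append(best_idx)
--                 window_end = i + distance
--                 best_idx, best_val = i, v
--                 have = True
--     if have:
--         result.append(best_idx)
--     return result
-- ===== Notes on version B (the rewrite author's own statement) =====
-- stated objective: simpler
-- what changed: B replaces A's two phases (build a list of trough dicts, then a nested while/while + min() window scan over it) with a single online pass over the signal keeping only the current window's end, best index and best value, flushing when a minimum falls outside the window.
import Mathlib
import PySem

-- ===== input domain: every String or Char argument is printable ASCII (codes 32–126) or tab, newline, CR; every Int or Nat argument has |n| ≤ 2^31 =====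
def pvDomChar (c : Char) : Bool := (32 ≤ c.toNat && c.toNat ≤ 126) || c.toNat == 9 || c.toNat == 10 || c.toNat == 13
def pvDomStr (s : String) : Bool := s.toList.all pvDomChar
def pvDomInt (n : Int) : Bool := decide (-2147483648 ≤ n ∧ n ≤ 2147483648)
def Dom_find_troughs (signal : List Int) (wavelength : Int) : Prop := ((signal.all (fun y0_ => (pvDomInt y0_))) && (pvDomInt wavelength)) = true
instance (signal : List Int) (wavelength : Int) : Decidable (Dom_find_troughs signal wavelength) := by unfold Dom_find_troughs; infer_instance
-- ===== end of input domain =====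

-- B fuses A's two phases (collect all local minima, then window-filter them) into one online
-- pass that keeps only the current window's best trough — no intermediate trough list;
-- objective: simpler one-pass decomposition (same asymptotic cost).


-- ===== PORT A =====
-- body of A's first loop: 'if signal[i] < signal[i-1] and signal[i] < signal[i+1]: all_troughs.append({...})'
-- (the dict {'idx': i, 'value': signal[i]} is ported as the pair (i, signal[i]); indices produced by
-- range(1, len-1) are always in range, so signal[i] is pyGetD with an unreachable default)
def aTstep (signal : List Int) (acc : List (Int × Int)) (i : Int) : List (Int × Int) :=
  if PySem.List.pyGetD signal i 0 < PySem.List.pyGetD signal (i - 1) 0 ∧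
     PySem.List.pyGetD signal i 0 < PySem.List.pyGetD signal (i + 1) 0
  then acc ++ [(i, PySem.List.pyGetD signal i 0)] else acc

-- 'for i in range(1, len(signal) - 1): …'
def aTroughs (signal : List Int) : List (Int × Int) :=
  (PySem.List.pyRange 1 ((signal.length : Int) - 1) 1).foldl (aTstep signal) []

-- A's inner while loop: collect troughs with idx < window_end, return (window tail, rest)
def aWindow : List (Int × Int) → Int → List (Int × Int) × List (Int × Int)
  | [], _ => ([], [])
  | t :: tl, we =>
    if t.1 < we then
      let p := aWindow tl we
      (t :: p.1, p.2)
    else ([], t :: tl)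

-- termination measure for the outer while loop below
theorem aWindow_len (ts : List (Int × Int)) (we : Int) : (aWindow ts we).2.length ≤ ts.length := by
  induction ts with
  | nil => simp [aWindow]
  | cons t tl ih =>
    simp only [aWindow]
    split
    · exact Nat.le_succ_of_le ih
    · simp

-- min(window, key=lambda p: p['value']): first element with minimal value (strict '<' keeps the
-- earlier one on ties, exactly Python's min); window here is b :: w
def aMin (b : Int × Int) (w : List (Int × Int)) : Int × Int :=
  w.foldl (fun b p => if p.2 < b.2 then p else b) b

-- A's outer while loop over all_troughs
def aFilter (ts : List (Int × Int)) (d : Int) : List Int :=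
  match ts with
  | [] => []
  | t :: tl =>
    let p := aWindow tl (t.1 + d)
    (aMin t p.1).1 :: aFilter p.2 d
termination_by ts.length
decreasing_by exact Nat.lt_succ_of_le (aWindow_len tl (t.1 + d))

def find_troughs (signal : List Int) (wavelength : Int) : List Int :=
  aFilter (aTroughs signal) (PySem.Int.floordiv wavelength 4)

-- ===== PORT B =====
-- B's state: (result so far, pending window = some (window_end, (best_idx, best_val)) when 'have')
-- update at a detected local minimum t = (i, v)
def bStep (d : Int) (st : List Int × Option (Int × (Int × Int))) (t : Int × Int) :
    List Int × Option (Int × (Int × Int)) :=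
  match st.2 with
  | some (we, b) =>
    if t.1 < we then
      if t.2 < b.2 then (st.1, some (we, t)) else st
    else (st.1 ++ [b.1], some (t.1 + d, t))
  | none => (st.1, some (t.1 + d, t))

-- loop body: 'v = signal[i]; if v < signal[i-1] and v < signal[i+1]: …'
def bBody (signal : List Int) (d : Int) (st : List Int × Option (Int × (Int × Int))) (i : Int) :
    List Int × Option (Int × (Int × Int)) :=
  if PySem.List.pyGetD signal i 0 < PySem.List.pyGetD signal (i - 1) 0 ∧
     PySem.List.pyGetD signal i 0 < PySem.List.pyGetD signal (i + 1) 0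
  then bStep d st (i, PySem.List.pyGetD signal i 0) else st

-- 'if have: result.append(best_idx)' after the loop
def bFlush (st : List Int × Option (Int × (Int × Int))) : List Int :=
  match st.2 with
  | some (_, b) => st.1 ++ [b.1]
  | none => st.1

def find_troughs_alt (signal : List Int) (wavelength : Int) : List Int :=
  bFlush ((PySem.List.pyRange 1 ((signal.length : Int) - 1) 1).foldl
    (bBody signal (PySem.Int.floordiv wavelength 4)) ([], none))

-- ===== PRECONDITION & SPEC =====
def Spec_find_troughs (signal : List Int) (wavelength : Int) (out : List Int) : Prop := out = find_troughs_alt signal wavelength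
instance (signal : List Int) (wavelength : Int) (out : List Int) : Decidable (Spec_find_troughs signal wavelength out) := by unfold Spec_find_troughs; infer_instance

-- ===== CLAIM (what is proved, stated in full; the proofs are below) =====
def Claim_equal_find_troughs : Prop := ∀ (signal : List Int) (wavelength : Int), Dom_find_troughs signal wavelength → Spec_find_troughs signal wavelength (find_troughs signal wavelength)

-- ===== LEMMAS AND PROOFS =====

-- the trough accumulator only ever appends, so its accumulator factors out
theorem tstep_shift (signal : List Int) :
    ∀ (l : List Int) (acc : List (Int × Int)),
      l.foldl (aTstep signal) acc = acc ++ l.foldl (aTstep signal) [] := by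
  intro l
  induction l with
  | nil => simp
  | cons i tl ih =>
    intro acc
    simp only [List.foldl_cons]
    rw [ih (aTstep signal acc i), ih (aTstep signal [] i)]
    have h : aTstep signal acc i = acc ++ aTstep signal [] i := by
      unfold aTstep; split_ifs <;> simp
    rw [h, List.append_assoc]

-- fusion: B's single pass over the index range equals folding bStep over A's trough list
theorem fuse (signal : List Int) (d : Int) :
    ∀ (l : List Int) (st : List Int × Option (Int × (Int × Int))),
      l.foldl (bBody signal d) st = (l.foldl (aTstep signal) []).foldl (bStep d) st := by
  intro l
  induction l with
  | nil => intro st; rfl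
  | cons i tl ih =>
    intro st
    simp only [List.foldl_cons]
    rw [ih (bBody signal d st i), tstep_shift signal tl (aTstep signal [] i), List.foldl_append]
    have h : bBody signal d st i = (aTstep signal [] i).foldl (bStep d) st := by
      unfold bBody aTstep; split_ifs <;> rfl
    rw [h]

-- running bStep over a trough list from a pending window reproduces A's window/min/recurse shape
theorem runWin (d : Int) :
    ∀ (ts : List (Int × Int)) (we : Int) (b : Int × Int) (res : List Int),
      bFlush (ts.foldl (bStep d) (res, some (we, b)))
        = res ++ (aMin b (aWindow ts we).1).1 :: aFilter (aWindow ts we).2 d := by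
  intro ts
  induction ts with
  | nil => intro we b res; simp [bFlush, aWindow, aMin, aFilter]
  | cons t tl ih =>
    intro we b res
    simp only [List.foldl_cons]
    by_cases h : t.1 < we
    · have hb : bStep d (res, some (we, b)) t
          = (res, some (we, if t.2 < b.2 then t else b)) := by
        simp only [bStep, if_pos h]; split_ifs <;> rfl
      rw [hb, ih we (if t.2 < b.2 then t else b) res]
      simp only [aWindow, if_pos h]
      rfl
    · have hb : bStep d (res, some (we, b)) t = (res ++ [b.1], some (t.1 + d, t)) := by
        simp only [bStep, if_neg h]
      rw [hb, ih (t.1 + d) t (res ++ [b.1])]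
      simp only [aWindow, if_neg h]
      simp [aMin, aFilter]


-- the whole fused run equals A's filter loop on the trough list
theorem runAll (d : Int) (ts : List (Int × Int)) :
    bFlush (ts.foldl (bStep d) ([], none)) = aFilter ts d := by
  cases ts with
  | nil => simp [bFlush, aFilter]
  | cons t tl =>
    simp only [List.foldl_cons]
    have hb : bStep d (([] : List Int), (none : Option (Int × (Int × Int)))) t
        = ([], some (t.1 + d, t)) := rfl
    rw [hb, runWin d tl (t.1 + d) t []]
    simp [aFilter]

-- ===== VERDICT (by name: the statement is the Claim_ definition above) =====
theorem find_troughs_spec : Claim_equal_find_troughs := by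
  intro signal wavelength _
  unfold Spec_find_troughs find_troughs find_troughs_alt
  rw [fuse signal (PySem.Int.floordiv wavelength 4), runAll]
  rfl
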